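-- pv_equiv track=rewrite | github.com/LynxTWO/mix-marriage-offline | tools/agent/index_build.py | _build_file_summary
-- ===== SOURCE A (Python) =====
-- def _build_file_summary(graph: dict) -> dict:
--     """Count edge types per source file.
--
--     Returns:
--         Dict keyed by file path (sorted); values are
--         ``{py_imports_count, id_refs_count, schema_refs_count}`` dicts.
--     """
--     summary: dict[str, dict] = {}
--
--     def _rec(path: str) -> dict:
--         return summary.setdefault(
--             path,
--             {"id_refs_count": 0, "py_imports_count": 0, "schema_refs_count": 0},
--         )
--
--     for edge in graph.get("edges", []):
--         kind = edge.get("kind", "")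
--         src = edge.get("src", "")
--         if not src:
--             continue
--         rec = _rec(src)
--         if kind == "py_import":
--             rec["py_imports_count"] += 1
--         elif kind == "id_ref":
--             rec["id_refs_count"] += 1
--         elif kind == "schema_ref":
--             rec["schema_refs_count"] += 1
--
--     return dict(sorted(summary.items()))
-- ===== SOURCE B (Python) =====
-- from itertools import groupby
--
--
-- def _build_file_summary(graph: dict) -> dict:
--     """Count edge types per source file (sort-then-group re-implementation)."""
--     edges = [e for e in graph.get("edges", []) if e.get("src", "")]
--     edges.sort(key=lambda e: e.get("src", ""))
--     summary: dict[str, dict] = {}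
--     for src, grp in groupby(edges, key=lambda e: e.get("src", "")):
--         id_refs = py_imports = schema_refs = 0
--         for edge in grp:
--             kind = edge.get("kind", "")
--             if kind == "py_import":
--                 py_imports += 1
--             elif kind == "id_ref":
--                 id_refs += 1
--             elif kind == "schema_ref":
--                 schema_refs += 1
--         summary[src] = {
--             "id_refs_count": id_refs,
--             "py_imports_count": py_imports,
--             "schema_refs_count": schema_refs,
--         }
--     return summary
-- ===== Notes on version B (the rewrite author's own statement) =====
-- stated objective: alternative
-- what changed: Instead of building an unsorted per-file dict with setdefault while scanning edges and sorting the accumulator at the end, B filters the edges, sorts them by src, and tallies each file's contiguous group with itertools.groupby, emitting results already in sorted order.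
import Mathlib
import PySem

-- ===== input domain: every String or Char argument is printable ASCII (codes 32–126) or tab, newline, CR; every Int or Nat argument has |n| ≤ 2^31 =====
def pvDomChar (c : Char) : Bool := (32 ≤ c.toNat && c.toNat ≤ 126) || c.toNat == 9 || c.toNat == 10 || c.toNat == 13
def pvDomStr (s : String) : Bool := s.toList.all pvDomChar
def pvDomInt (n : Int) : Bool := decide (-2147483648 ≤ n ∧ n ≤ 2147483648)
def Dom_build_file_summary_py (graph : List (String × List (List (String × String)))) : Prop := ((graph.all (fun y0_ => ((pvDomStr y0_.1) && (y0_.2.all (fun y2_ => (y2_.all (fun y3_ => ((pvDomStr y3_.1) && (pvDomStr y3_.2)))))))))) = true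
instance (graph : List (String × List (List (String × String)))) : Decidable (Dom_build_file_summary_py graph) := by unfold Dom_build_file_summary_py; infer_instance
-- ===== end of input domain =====

-- B re-implements the per-file edge-kind count by filter + sort-by-src + group-consecutive-runs
-- instead of A's setdefault-dict accumulation followed by a final sort (objective: alternative
-- algorithm of similar cost). Return values only; neither version mutates its argument.

-- shared input decoding: e.get(k, "") on a Python dict passed as an assoc list (first match)
def pvEdgeGet (e : List (String × String)) (k : String) : String :=
  (PySem.Dict.mk e).getD k ""

-- ===== PORT A =====
def pvZeroRec : PySem.Dict String Int :=
  PySem.Dict.ofList [("id_refs_count", 0), ("py_imports_count", 0), ("schema_refs_count", 0)]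

-- rec["…"] += 1: the if/elif chain acts on the aliased inner dict rec = summary.setdefault(src, …)
def pvBump (r : PySem.Dict String Int) (kind : String) : PySem.Dict String Int :=
  if kind == "py_import" then r.modify "py_imports_count" 0 (· + 1)
  else if kind == "id_ref" then r.modify "id_refs_count" 0 (· + 1)
  else if kind == "schema_ref" then r.modify "schema_refs_count" 0 (· + 1)
  else r

def pvStepA (d : PySem.Dict String (PySem.Dict String Int)) (edge : List (String × String)) :
    PySem.Dict String (PySem.Dict String Int) :=
  let kind := pvEdgeGet edge "kind"
  let src := pvEdgeGet edge "src"
  if src == "" then d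
  else (d.setdefault src pvZeroRec).modify src pvZeroRec (fun r => pvBump r kind)

def build_file_summary_py (graph : List (String × List (List (String × String)))) :
    List (String × List (String × Int)) :=
  let edges := (PySem.Dict.mk graph).getD "edges" []
  let summary := edges.foldl pvStepA PySem.Dict.empty
  -- dict(sorted(summary.items())): Python compares the (key, value) tuples left to right and the
  -- keys are distinct, so it is exactly the sort by key (the value dicts are never compared)
  (PySem.List.sorted summary.items (fun p => p.1)).map (fun p => (p.1, p.2.items))

-- ===== PORT B =====
def pvTally (acc : Int × Int × Int) (edge : List (String × String)) : Int × Int × Int :=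
  let kind := pvEdgeGet edge "kind"
  if kind == "py_import" then (acc.1, acc.2.1 + 1, acc.2.2)
  else if kind == "id_ref" then (acc.1 + 1, acc.2.1, acc.2.2)
  else if kind == "schema_ref" then (acc.1, acc.2.1, acc.2.2 + 1)
  else acc

-- itertools.groupby(l, key=src): maximal runs of consecutive edges with equal src (hand port, exact)
def pvGroupRuns : List (List (String × String)) → List (String × List (List (String × String)))
  | [] => []
  | e :: t =>
    (pvEdgeGet e "src", e :: t.takeWhile (fun x => pvEdgeGet x "src" == pvEdgeGet e "src")) ::
      pvGroupRuns (t.dropWhile (fun x => pvEdgeGet x "src" == pvEdgeGet e "src"))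
termination_by l => l.length
decreasing_by
  simp only [List.length_cons]
  exact Nat.lt_succ_of_le (List.length_dropWhile_le _ _)

def build_file_summary_py_alt (graph : List (String × List (List (String × String)))) :
    List (String × List (String × Int)) :=
  let edges := ((PySem.Dict.mk graph).getD "edges" []).filter (fun e => pvEdgeGet e "src" != "")
  let sortedEdges := PySem.List.sorted edges (fun e => pvEdgeGet e "src")
  (pvGroupRuns sortedEdges).map (fun g =>
    let c := g.2.foldl pvTally (0, 0, 0)
    (g.1, [("id_refs_count", c.1), ("py_imports_count", c.2.1), ("schema_refs_count", c.2.2)]))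

-- ===== PRECONDITION & SPEC =====
def Spec_build_file_summary_py (graph : List (String × List (List (String × String)))) (out : List (String × List (String × Int))) : Prop := out = build_file_summary_py_alt graph
instance (graph : List (String × List (List (String × String)))) (out : List (String × List (String × Int))) : Decidable (Spec_build_file_summary_py graph out) := by unfold Spec_build_file_summary_py; infer_instance

-- ===== CLAIM (what is proved, stated in full; the proofs are below) =====
def Claim_equal_build_file_summary_py : Prop := ∀ (graph : List (String × List (List (String × String)))), Dom_build_file_summary_py graph → Spec_build_file_summary_py graph (build_file_summary_py graph)

-- ===== LEMMAS AND PROOFS =====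

-- shorthand counters (proof-only)
def pvCI (l : List (List (String × String))) : Int := (l.countP (fun e => pvEdgeGet e "kind" == "id_ref") : Int)
def pvCP (l : List (List (String × String))) : Int := (l.countP (fun e => pvEdgeGet e "kind" == "py_import") : Int)
def pvCS (l : List (List (String × String))) : Int := (l.countP (fun e => pvEdgeGet e "kind" == "schema_ref") : Int)
def pvR (a b c : Int) : PySem.Dict String Int :=
  PySem.Dict.ofList [("id_refs_count", a), ("py_imports_count", b), ("schema_refs_count", c)]

theorem pvR_items (a b c : Int) :
    (pvR a b c).items = [("id_refs_count", a), ("py_imports_count", b), ("schema_refs_count", c)] := rfl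

theorem pvBump_R (a b c : Int) (k : String) :
    pvBump (pvR a b c) k =
      pvR (a + (if k == "id_ref" then 1 else 0)) (b + (if k == "py_import" then 1 else 0))
        (c + (if k == "schema_ref" then 1 else 0)) := by
  by_cases h1 : k = "py_import"
  · subst h1
    have h : (pvR a b c).modify "py_imports_count" 0 (· + 1) = pvR a (b + 1) c := rfl
    simp [pvBump, h]
  · by_cases h2 : k = "id_ref"
    · subst h2
      have h : (pvR a b c).modify "id_refs_count" 0 (· + 1) = pvR (a + 1) b c := rfl
      simp [pvBump, h]
    · by_cases h3 : k = "schema_ref"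
      · subst h3
        have h : (pvR a b c).modify "schema_refs_count" 0 (· + 1) = pvR a b (c + 1) := rfl
        simp [pvBump, h]
      · simp [pvBump, beq_iff_eq, h1, h2, h3]

theorem pvCI_cons (e : List (String × String)) (t : List (List (String × String))) :
    pvCI (e :: t) = pvCI t + (if pvEdgeGet e "kind" == "id_ref" then 1 else 0) := by
  unfold pvCI; rw [List.countP_cons]
  by_cases h : (pvEdgeGet e "kind" == "id_ref") = true <;> simp [h]

theorem pvCP_cons (e : List (String × String)) (t : List (List (String × String))) :
    pvCP (e :: t) = pvCP t + (if pvEdgeGet e "kind" == "py_import" then 1 else 0) := by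
  unfold pvCP; rw [List.countP_cons]
  by_cases h : (pvEdgeGet e "kind" == "py_import") = true <;> simp [h]

theorem pvCS_cons (e : List (String × String)) (t : List (List (String × String))) :
    pvCS (e :: t) = pvCS t + (if pvEdgeGet e "kind" == "schema_ref" then 1 else 0) := by
  unfold pvCS; rw [List.countP_cons]
  by_cases h : (pvEdgeGet e "kind" == "schema_ref") = true <;> simp [h]

theorem pvBump_run (l : List (List (String × String))) (a b c : Int) :
    l.foldl (fun r e => pvBump r (pvEdgeGet e "kind")) (pvR a b c) =
      pvR (a + pvCI l) (b + pvCP l) (c + pvCS l) := by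
  induction l generalizing a b c with
  | nil => simp [pvCI, pvCP, pvCS]
  | cons e t ih =>
    rw [List.foldl_cons, pvBump_R, ih, pvCI_cons, pvCP_cons, pvCS_cons]
    have hI : a + (if pvEdgeGet e "kind" == "id_ref" then (1:Int) else 0) + pvCI t
        = a + (pvCI t + (if pvEdgeGet e "kind" == "id_ref" then 1 else 0)) := by ring
    have hP : b + (if pvEdgeGet e "kind" == "py_import" then (1:Int) else 0) + pvCP t
        = b + (pvCP t + (if pvEdgeGet e "kind" == "py_import" then 1 else 0)) := by ring
    have hS : c + (if pvEdgeGet e "kind" == "schema_ref" then (1:Int) else 0) + pvCS t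
        = c + (pvCS t + (if pvEdgeGet e "kind" == "schema_ref" then 1 else 0)) := by ring
    rw [hI, hP, hS]

theorem pvTally_eq (acc : Int × Int × Int) (e : List (String × String)) :
    pvTally acc e =
      (acc.1 + (if pvEdgeGet e "kind" == "id_ref" then 1 else 0),
       acc.2.1 + (if pvEdgeGet e "kind" == "py_import" then 1 else 0),
       acc.2.2 + (if pvEdgeGet e "kind" == "schema_ref" then 1 else 0)) := by
  by_cases h1 : pvEdgeGet e "kind" = "py_import"
  · simp [pvTally, h1]
  · by_cases h2 : pvEdgeGet e "kind" = "id_ref"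
    · simp [pvTally, h2]
    · by_cases h3 : pvEdgeGet e "kind" = "schema_ref"
      · simp [pvTally, h3]
      · simp [pvTally, beq_iff_eq, h1, h2, h3]

theorem pvTally_run (l : List (List (String × String))) (a b c : Int) :
    l.foldl pvTally (a, b, c) = (a + pvCI l, b + pvCP l, c + pvCS l) := by
  induction l generalizing a b c with
  | nil => simp [pvCI, pvCP, pvCS]
  | cons e t ih =>
    rw [List.foldl_cons, pvTally_eq, ih, pvCI_cons, pvCP_cons, pvCS_cons]
    simp only [Prod.mk.injEq]
    refine ⟨by ring, by ring, by ring⟩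

-- getD of one A-step
theorem pvStepA_getD (d : PySem.Dict String (PySem.Dict String Int)) (e : List (String × String))
    (s : String) (hs : s ≠ "") :
    (pvStepA d e).getD s pvZeroRec =
      if pvEdgeGet e "src" == s then pvBump (d.getD s pvZeroRec) (pvEdgeGet e "kind")
      else d.getD s pvZeroRec := by
  have hd1 : (d.setdefault (pvEdgeGet e "src") pvZeroRec).getD s pvZeroRec
      = d.getD s pvZeroRec := by
    by_cases hc : d.contains (pvEdgeGet e "src") = true
    · rw [PySem.Dict.setdefault_of_contains _ _ hc]
    · rw [PySem.Dict.setdefault_of_not_contains _ _ (by simpa using hc)]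
      by_cases hss : s = pvEdgeGet e "src"
      · subst hss
        rw [PySem.Dict.getD_insert_self, PySem.Dict.getD_of_not_contains _ _ (by simpa using hc)]
      · rw [PySem.Dict.getD_insert_of_ne _ _ _ hss]
  by_cases h0 : pvEdgeGet e "src" = ""
  · simp [pvStepA, h0]
    exact fun h => absurd h hs
  · have hc0 : (pvEdgeGet e "src" == "") = false := beq_eq_false_iff_ne.mpr h0
    by_cases hss : pvEdgeGet e "src" = s
    · have hct : (pvEdgeGet e "src" == s) = true := beq_iff_eq.mpr hss
      simp only [pvStepA, hc0, Bool.false_eq_true, if_false, hct, if_true]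
      rw [hss] at hd1 ⊢
      rw [PySem.Dict.getD_modify_self, hd1]
    · have hcf : (pvEdgeGet e "src" == s) = false := beq_eq_false_iff_ne.mpr hss
      simp only [pvStepA, hc0, Bool.false_eq_true, if_false, hcf]
      rw [PySem.Dict.getD_modify_of_ne _ _ _ (fun h => hss h.symm), hd1]

theorem pvFoldA_getD (l : List (List (String × String)))
    (d : PySem.Dict String (PySem.Dict String Int)) (s : String) (hs : s ≠ "") :
    (l.foldl pvStepA d).getD s pvZeroRec =
      (l.filter (fun e => pvEdgeGet e "src" == s)).foldl
        (fun r e => pvBump r (pvEdgeGet e "kind")) (d.getD s pvZeroRec) := by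
  induction l generalizing d with
  | nil => rfl
  | cons e t ih =>
    rw [List.foldl_cons, ih (pvStepA d e), pvStepA_getD d e s hs, List.filter_cons]
    by_cases h : (pvEdgeGet e "src" == s) = true <;> simp [h]

-- keys of one A-step
theorem pvStepA_keys (d : PySem.Dict String (PySem.Dict String Int)) (e : List (String × String)) :
    (pvStepA d e).keys =
      if pvEdgeGet e "src" == "" then d.keys else PySem.Set.add d.keys (pvEdgeGet e "src") := by
  by_cases h0 : pvEdgeGet e "src" = ""
  · simp [pvStepA, h0]
  · have hc0 : (pvEdgeGet e "src" == "") = false := beq_eq_false_iff_ne.mpr h0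
    simp only [pvStepA, hc0, Bool.false_eq_true, if_false]
    rw [PySem.Dict.keys_modify]
    by_cases hc : d.contains (pvEdgeGet e "src") = true
    · rw [PySem.Dict.setdefault_of_contains _ _ hc,
        PySem.Dict.keys_insert_of_contains _ _ hc]
      have hmem : pvEdgeGet e "src" ∈ d.keys := (PySem.Dict.contains_iff_mem_keys _ _).mp hc
      simp [PySem.Set.add, PySem.Set.contains, hmem]
    · rw [PySem.Dict.setdefault_of_not_contains _ _ (by simpa using hc)]
      have hct : ((d.insert (pvEdgeGet e "src") pvZeroRec).contains (pvEdgeGet e "src")) = true :=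
        PySem.Dict.contains_insert_self _ _ _
      rw [PySem.Dict.keys_insert_of_contains _ _ hct,
        PySem.Dict.keys_insert_of_not_contains _ _ (by simpa using hc)]
      have hmem : pvEdgeGet e "src" ∉ d.keys :=
        fun h => by simp [(PySem.Dict.contains_iff_mem_keys _ _).mpr h] at hc
      simp [PySem.Set.add, PySem.Set.contains, hmem]

theorem pvFoldA_keys (l : List (List (String × String)))
    (d : PySem.Dict String (PySem.Dict String Int)) :
    (l.foldl pvStepA d).keys =
      ((l.filter (fun e => pvEdgeGet e "src" != "")).map (fun e => pvEdgeGet e "src")).foldl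
        PySem.Set.add d.keys := by
  induction l generalizing d with
  | nil => rfl
  | cons e t ih =>
    rw [List.foldl_cons, ih (pvStepA d e), pvStepA_keys, List.filter_cons]
    by_cases h0 : pvEdgeGet e "src" = "" <;> simp [h0]

-- Set.add facts used below
theorem pvSet_add_cases {α : Type} [BEq α] (s : List α) (x : α) :
    PySem.Set.add s x = s ∨ PySem.Set.add s x = s ++ [x] := by
  by_cases h : PySem.Set.contains s x = true
  · exact Or.inl (by unfold PySem.Set.add; rw [if_pos h])
  · exact Or.inr (by unfold PySem.Set.add; rw [if_neg h])

theorem pvFoldlAdd_sublist {α : Type} [BEq α] (ys : List α) :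
    ∀ acc : List α, ∃ zs, ys.foldl PySem.Set.add acc = acc ++ zs ∧ zs.Sublist ys := by
  induction ys with
  | nil => exact fun acc => ⟨[], by simp⟩
  | cons y t ih =>
    intro acc
    rw [List.foldl_cons]
    rcases pvSet_add_cases acc y with h | h
    · rcases ih acc with ⟨zs, h1, h2⟩
      exact ⟨zs, by rw [h, h1], h2.cons y⟩
    · rcases ih (acc ++ [y]) with ⟨zs, h1, h2⟩
      exact ⟨y :: zs, by rw [h, h1, List.append_assoc]; rfl, h2.cons₂ y⟩

theorem pvOfList_sublist {α : Type} [BEq α] (xs : List α) :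
    (PySem.Set.ofList xs).Sublist xs := by
  rcases pvFoldlAdd_sublist xs [] with ⟨zs, h1, h2⟩
  rw [PySem.Set.ofList_eq_foldl, h1]
  simpa using h2

theorem pvSet_cons_not_mem {α : Type} [BEq α] [LawfulBEq α] (s0 : α)
    (ys : List α) (h : s0 ∉ ys) :
    ∀ acc : List α, ys.foldl PySem.Set.add (s0 :: acc) = s0 :: ys.foldl PySem.Set.add acc := by
  induction ys with
  | nil => intro acc; rfl
  | cons y t ih =>
    intro acc
    have hy : s0 ≠ y := fun he => h (he ▸ List.mem_cons_self ..)
    have hadd : PySem.Set.add (s0 :: acc) y = s0 :: PySem.Set.add acc y := by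
      have hcon : PySem.Set.contains (s0 :: acc) y = PySem.Set.contains acc y := by
        show List.contains (s0 :: acc) y = List.contains acc y
        simp only [List.contains_cons]
        simp [beq_eq_false_iff_ne.mpr (Ne.symm hy)]
      unfold PySem.Set.add
      rw [hcon]
      by_cases hc : PySem.Set.contains acc y = true
      · rw [if_pos hc, if_pos hc]
      · rw [if_neg hc, if_neg hc]; rfl
    rw [List.foldl_cons, hadd, List.foldl_cons]
    exact ih (fun hm => h (List.mem_cons_of_mem _ hm)) _

theorem pvFoldlAdd_const {α : Type} [BEq α] [LawfulBEq α] (s0 : α) (ys : List α)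
    (h : ∀ y ∈ ys, y = s0) : ys.foldl PySem.Set.add [s0] = [s0] := by
  induction ys with
  | nil => rfl
  | cons y t ih =>
    have hy : y = s0 := h y (List.mem_cons_self ..)
    rw [List.foldl_cons]
    have : PySem.Set.add [s0] y = [s0] := by
      subst hy; simp [PySem.Set.add, PySem.Set.contains]
    rw [this]
    exact ih (fun z hz => h z (List.mem_cons_of_mem _ hz))

theorem pvDropWhile_head {α : Type} (p : α → Bool) (l : List α) (x : α) (r : List α)
    (h : l.dropWhile p = x :: r) : p x = false := by
  induction l with
  | nil => simp at h
  | cons a t ih =>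
    rw [List.dropWhile_cons] at h
    split at h
    · exact ih h
    · cases h; simp_all

-- groupby on a src-sorted list: one group per distinct src, in order, holding all its edges
theorem pvGroupRuns_spec (l : List (List (String × String)))
    (h : l.Pairwise (fun a b => pvEdgeGet a "src" ≤ pvEdgeGet b "src")) :
    pvGroupRuns l =
      (PySem.Set.ofList (l.map (fun e => pvEdgeGet e "src"))).map
        (fun s => (s, l.filter (fun e => pvEdgeGet e "src" == s))) := by
  induction l using pvGroupRuns.induct with
  | case1 => simp [pvGroupRuns]
  | case2 e t ih =>
    have hpc := List.pairwise_cons.mp h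
    have hle : ∀ x ∈ t, pvEdgeGet e "src" ≤ pvEdgeGet x "src" := hpc.1
    have ht : t.Pairwise (fun a b => pvEdgeGet a "src" ≤ pvEdgeGet b "src") := hpc.2
    set s0 := pvEdgeGet e "src" with hs0
    set run := t.takeWhile (fun x => pvEdgeGet x "src" == s0) with hrun
    set rest := t.dropWhile (fun x => pvEdgeGet x "src" == s0) with hrest
    have htd : run ++ rest = t := List.takeWhile_append_dropWhile
    have hrest_sub : rest.Sublist t := List.dropWhile_sublist _
    have hrest_pw : rest.Pairwise (fun a b => pvEdgeGet a "src" ≤ pvEdgeGet b "src") :=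
      ht.sublist hrest_sub
    have hrun_eq : ∀ x ∈ run, pvEdgeGet x "src" = s0 := by
      intro x hx
      rw [hrun] at hx
      exact beq_iff_eq.mp
        (List.mem_takeWhile_imp (p := fun x => pvEdgeGet x "src" == s0) hx)
    have hrest_ne : ∀ x ∈ rest, pvEdgeGet x "src" ≠ s0 := by
      cases hr : rest with
      | nil => simp
      | cons r0 rt =>
        have h0 : (pvEdgeGet r0 "src" == s0) = false :=
          pvDropWhile_head _ t r0 rt (by rw [← hrest, hr])
        have h0' : pvEdgeGet r0 "src" ≠ s0 := by simpa using h0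
        have hr0t : r0 ∈ t := hrest_sub.subset (by rw [hr]; exact List.mem_cons_self ..)
        have hlt : s0 < pvEdgeGet r0 "src" := lt_of_le_of_ne (hle r0 hr0t) (Ne.symm h0')
        intro x hx
        rcases List.mem_cons.mp hx with hx0 | hxt
        · subst hx0; exact h0'
        · have : pvEdgeGet r0 "src" ≤ pvEdgeGet x "src" := by
            rw [hr] at hrest_pw
            exact (List.pairwise_cons.mp hrest_pw).1 x hxt
          exact fun hc => absurd (hc ▸ this) (not_le.mpr hlt)
    -- the distinct srcs of e :: t are s0 followed by those of rest
    have hkeys : PySem.Set.ofList ((e :: t).map (fun x => pvEdgeGet x "src"))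
        = s0 :: PySem.Set.ofList (rest.map (fun x => pvEdgeGet x "src")) := by
      rw [PySem.Set.ofList_eq_foldl, PySem.Set.ofList_eq_foldl]
      rw [List.map_cons, List.foldl_cons]
      have hadd0 : PySem.Set.add ([] : List String) s0 = [s0] := rfl
      rw [hadd0, ← htd, List.map_append, List.foldl_append]
      rw [pvFoldlAdd_const s0 (run.map (fun x => pvEdgeGet x "src"))
        (by intro y hy; rcases List.mem_map.mp hy with ⟨x, hx, hxy⟩; rw [← hxy]; exact hrun_eq x hx)]
      rw [pvSet_cons_not_mem s0 _
        (by intro hm; rcases List.mem_map.mp hm with ⟨x, hx, hxy⟩; exact hrest_ne x hx hxy) []]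
    have hfilter0 : (e :: t).filter (fun x => pvEdgeGet x "src" == s0) = e :: run := by
      rw [List.filter_cons]
      have : (pvEdgeGet e "src" == s0) = true := beq_iff_eq.mpr rfl
      simp only [this, if_true]
      congr 1
      rw [← htd, List.filter_append]
      have h1 : run.filter (fun x => pvEdgeGet x "src" == s0) = run :=
        List.filter_eq_self.mpr (fun x hx => beq_iff_eq.mpr (hrun_eq x hx))
      have h2 : rest.filter (fun x => pvEdgeGet x "src" == s0) = [] :=
        List.filter_eq_nil_iff.mpr (fun x hx => by simpa using hrest_ne x hx)
      rw [h1, h2, List.append_nil]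
    rw [pvGroupRuns, hkeys, List.map_cons, ← hs0, ← hrun, ← hrest, hfilter0]
    congr 1
    rw [ih hrest_pw]
    apply List.map_congr_left
    intro s hsmem
    have hs_ne : s ≠ s0 := by
      rcases List.mem_map.mp ((PySem.Set.mem_ofList _ _).mp hsmem) with ⟨x, hx, hxy⟩
      exact fun hc => hrest_ne x hx (by rw [hxy, hc])
    have : (e :: t).filter (fun x => pvEdgeGet x "src" == s)
        = rest.filter (fun x => pvEdgeGet x "src" == s) := by
      rw [List.filter_cons]
      have he : (pvEdgeGet e "src" == s) = false :=
        beq_eq_false_iff_ne.mpr (fun hc => hs_ne (hc.symm.trans hs0.symm))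
      simp only [he, Bool.false_eq_true, if_false]
      rw [← htd, List.filter_append]
      have h1 : run.filter (fun x => pvEdgeGet x "src" == s) = [] :=
        List.filter_eq_nil_iff.mpr (fun x hx hbx =>
          hs_ne ((beq_iff_eq.mp hbx).symm.trans (hrun_eq x hx)))
      rw [h1, List.nil_append]
    rw [this]

-- ===== VERDICT (by name: the statement is the Claim_ definition above) =====
theorem build_file_summary_py_spec : Claim_equal_build_file_summary_py := by
  intro graph _
  unfold Spec_build_file_summary_py build_file_summary_py build_file_summary_py_alt
  simp only []
  set E := (PySem.Dict.mk graph).getD "edges" [] with hE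
  set F := E.filter (fun e => pvEdgeGet e "src" != "") with hF
  set l := PySem.List.sorted F (fun e => pvEdgeGet e "src") with hl
  set summary := E.foldl pvStepA (PySem.Dict.empty : PySem.Dict String (PySem.Dict String Int))
    with hsum
  set K : List String := PySem.Set.ofList (F.map (fun e => pvEdgeGet e "src")) with hK
  set K' : List String := PySem.Set.ofList (l.map (fun e => pvEdgeGet e "src")) with hK'
  -- A side: keys of the accumulated dict are exactly K
  have hkeys : summary.keys = K := by
    rw [hsum, pvFoldA_keys, PySem.Dict.keys_empty, hK, PySem.Set.ofList_eq_foldl, hF]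
  have hnodup : summary.keys.Nodup := by rw [hkeys]; exact PySem.Set.nodup_ofList _
  have hitems : summary.items = K.map (fun k => (k, summary.getD k pvZeroRec)) := by
    rw [PySem.Dict.items_eq_map_keys summary hnodup pvZeroRec, hkeys]
  -- sorting the items by key is mapping over the sorted key list
  have hKlt : (PySem.List.sorted K (fun x => x)).Pairwise (fun a b => a < b) := by
    rw [hK]; exact PySem.List.sorted_ofList_pairwise_lt _
  have hsorted : PySem.List.sorted summary.items (fun p => p.1)
      = (PySem.List.sorted K (fun x => x)).map (fun k => (k, summary.getD k pvZeroRec)) := by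
    rw [hitems]
    apply PySem.List.sorted_eq_of_perm_of_pairwise_lt
    · exact (PySem.List.sorted_perm K _ _).map _
    · rw [List.pairwise_map]; exact hKlt
  -- B side: sorted distinct keys coincide
  have hperm : l.Perm F := PySem.List.sorted_perm F _ _
  have hK'K : PySem.List.sorted K (fun x => x) = K' := by
    apply PySem.List.sorted_eq_of_perm_of_pairwise_lt
    · rw [hK, hK']
      refine (List.perm_ext_iff_of_nodup (PySem.Set.nodup_ofList _) (PySem.Set.nodup_ofList _)).mpr ?_
      intro a
      rw [PySem.Set.mem_ofList, PySem.Set.mem_ofList]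
      exact (hperm.map (fun e => pvEdgeGet e "src")).mem_iff
    · have hsub : K'.Sublist (l.map (fun e => pvEdgeGet e "src")) := by
        rw [hK']; exact pvOfList_sublist _
      have hpw_le : K'.Pairwise (fun a b => a ≤ b) :=
        (PySem.List.sorted_map_key_pairwise F (fun e => pvEdgeGet e "src")).sublist hsub
      have hnd : K'.Nodup := by rw [hK']; exact PySem.Set.nodup_ofList _
      exact (hpw_le.and hnd).imp (fun h => lt_of_le_of_ne h.1 h.2)
  have hgroup : pvGroupRuns l =
      K'.map (fun s => (s, l.filter (fun e => pvEdgeGet e "src" == s))) := by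
    rw [hK']
    exact pvGroupRuns_spec l (PySem.List.sorted_pairwise F _)
  -- membership facts about K'
  have hK'_ne : ∀ s ∈ K', s ≠ "" := by
    intro s hsm
    rw [hK', PySem.Set.mem_ofList] at hsm
    rcases List.mem_map.mp ((hperm.map _).mem_iff.mp hsm) with ⟨x, hx, hxy⟩
    have := (List.mem_filter.mp (hF ▸ hx)).2
    rw [← hxy]
    simpa using this
  -- assemble both sides over the same key list
  rw [hsorted, hK'K, hgroup, List.map_map, List.map_map]
  apply List.map_congr_left
  intro s hsmem
  have hs : s ≠ "" := hK'_ne s hsmem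
  -- the multiset of edges counted for s is the same on both sides
  have hAcnt : summary.getD s pvZeroRec
      = pvR (pvCI (E.filter (fun e => pvEdgeGet e "src" == s)))
          (pvCP (E.filter (fun e => pvEdgeGet e "src" == s)))
          (pvCS (E.filter (fun e => pvEdgeGet e "src" == s))) := by
    rw [hsum, pvFoldA_getD E PySem.Dict.empty s hs, PySem.Dict.getD_empty]
    have : pvZeroRec = pvR 0 0 0 := rfl
    rw [this, pvBump_run]
    simp
  have hfilters : (l.filter (fun e => pvEdgeGet e "src" == s)).Perm
      (E.filter (fun e => pvEdgeGet e "src" == s)) := by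
    refine (hperm.filter _).trans ?_
    rw [hF, List.filter_filter]
    apply List.Perm.of_eq
    apply List.filter_congr
    intro x _
    by_cases hx : (pvEdgeGet x "src" == s) = true
    · have : pvEdgeGet x "src" ≠ "" := by rw [beq_iff_eq.mp hx]; exact hs
      simp [hx, this]
    · simp [hx]
  have hCI : pvCI (l.filter (fun e => pvEdgeGet e "src" == s))
      = pvCI (E.filter (fun e => pvEdgeGet e "src" == s)) := by
    unfold pvCI; rw [hfilters.countP_eq]
  have hCP : pvCP (l.filter (fun e => pvEdgeGet e "src" == s))
      = pvCP (E.filter (fun e => pvEdgeGet e "src" == s)) := by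
    unfold pvCP; rw [hfilters.countP_eq]
  have hCS : pvCS (l.filter (fun e => pvEdgeGet e "src" == s))
      = pvCS (E.filter (fun e => pvEdgeGet e "src" == s)) := by
    unfold pvCS; rw [hfilters.countP_eq]
  simp only [Function.comp]
  rw [hAcnt, pvR_items, pvTally_run]
  simp [hCI, hCP, hCS]
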